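-- pv_equiv track=rewrite | github.com/aaronday-dev/parameter-golf | scripts/estimate_row_subset_passthrough_size.py | flatten_specs
-- ===== SOURCE A (Python) =====
-- def flatten_specs(raw_specs: list[str]) -> list[str]:
--     specs: list[str] = []
--     for entry in raw_specs:
--         for spec in entry.split(","):
--             spec = spec.strip()
--             if spec:
--                 specs.append(spec)
--     return specs
-- ===== SOURCE B (Python) =====
-- def _trim(buf: list[str]) -> list[str]:
--     while buf and buf[0].isspace():
--         buf = buf[1:]
--     while buf and buf[-1].isspace():
--         buf = buf[:-1]
--     return buf
--
--
-- def flatten_specs(raw_specs: list[str]) -> list[str]: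
--     # character-level state machine: accumulate token chars, flush on ','
--     specs: list[str] = []
--     for entry in raw_specs:
--         buf: list[str] = []
--         for ch in entry:
--             if ch == ",":
--                 token = _trim(buf)
--                 if token:
--                     specs.append("".join(token))
--                 buf = []
--             else:
--                 buf.append(ch)
--         token = _trim(buf)
--         if token:
--             specs.append("".join(token))
--     return specs
-- ===== Notes on version B (the rewrite author's own statement) =====
-- stated objective: alternative
-- what changed: Replaces the split/strip/filter pipeline by a single character-level state machine: each entry is scanned char by char into a token buffer that is flushed (hand-trimmed by while loops, no str.split or str.strip) whenever a comma or the end of the entry is reached.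
import Mathlib
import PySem

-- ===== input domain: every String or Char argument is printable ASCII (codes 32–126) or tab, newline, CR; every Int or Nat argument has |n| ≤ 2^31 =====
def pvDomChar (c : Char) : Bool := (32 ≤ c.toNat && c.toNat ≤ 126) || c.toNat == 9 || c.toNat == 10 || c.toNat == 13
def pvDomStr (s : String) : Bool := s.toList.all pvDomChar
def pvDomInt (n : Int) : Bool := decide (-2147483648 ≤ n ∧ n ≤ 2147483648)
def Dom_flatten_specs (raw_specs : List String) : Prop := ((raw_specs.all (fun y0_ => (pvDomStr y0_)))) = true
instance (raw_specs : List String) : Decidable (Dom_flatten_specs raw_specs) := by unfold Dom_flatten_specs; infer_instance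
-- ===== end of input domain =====

-- B replaces A's split/strip/filter pipeline by a character-level state machine (buffer + flush
-- on comma, hand-written trim loops); objective: alternative decomposition, same cost.

-- ===== PORT A =====
def flatten_specs (raw_specs : List String) : List String :=
  raw_specs.foldl (fun specs entry =>
    -- entry.split(",") : sep is the non-empty literal ",", so Python never raises (split? is some)
    ((PySem.Str.split? entry ",").getD []).foldl (fun specs spec =>
      let spec := PySem.Str.strip spec
      if spec ≠ "" then specs ++ [spec] else specs) specs) []

-- ===== PORT B =====
/-- `_trim`: the two while-loops popping whitespace from the front and from the back. -/
def pvTrim (buf : List Char) : List Char :=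
  let buf := buf.dropWhile PySem.Chars.isspace            -- while buf and buf[0].isspace(): buf = buf[1:]
  (buf.reverse.dropWhile PySem.Chars.isspace).reverse     -- while buf and buf[-1].isspace(): buf = buf[:-1]

/-- flush the current buffer: trim it and append it to `specs` if non-empty. -/
def pvFlush (specs : List String) (buf : List Char) : List String :=
  let token := pvTrim buf
  if token ≠ [] then specs ++ [String.ofList token] else specs

def flatten_specs_alt (raw_specs : List String) : List String :=
  raw_specs.foldl (fun specs entry =>
    let st := entry.toList.foldl (fun (st : List String × List Char) ch =>
      if ch = ',' then (pvFlush st.1 st.2, []) else (st.1, st.2 ++ [ch])) (specs, [])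
    pvFlush st.1 st.2) []

-- ===== PRECONDITION & SPEC =====
def Spec_flatten_specs (raw_specs : List String) (out : List String) : Prop := out = flatten_specs_alt raw_specs
instance (raw_specs : List String) (out : List String) : Decidable (Spec_flatten_specs raw_specs out) := by unfold Spec_flatten_specs; infer_instance

-- ===== CLAIM (what is proved, stated in full; the proofs are below) =====
def Claim_equal_flatten_specs : Prop := ∀ (raw_specs : List String), Dom_flatten_specs raw_specs → Spec_flatten_specs raw_specs (flatten_specs raw_specs)

-- ===== LEMMAS AND PROOFS =====

/-- Simple structural model of `s.split(",")` (single-char separator). -/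
def pvSplit : List Char → List Char → List (List Char)
  | [], cur => [cur.reverse]
  | c :: rest, cur => if c = ',' then cur.reverse :: pvSplit rest [] else pvSplit rest (c :: cur)

lemma pvSplit_go (fuel : Nat) : ∀ (l cur : List Char) (acc : List (List Char)), l.length < fuel →
    PySem.Chars.splitOn.go [','] fuel l cur acc = acc.reverse ++ pvSplit l cur := by
  induction fuel with
  | zero => intro l cur acc h; omega
  | succ fuel ih =>
    intro l cur acc h
    cases l with
    | nil => simp [PySem.Chars.splitOn.go, pvSplit]
    | cons c rest =>
      by_cases hc : c = ','
      · subst hc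
        simp only [PySem.Chars.splitOn.go, List.isPrefixOf, BEq.rfl, Bool.true_and, if_pos,
          List.length_cons, List.drop_succ_cons, List.length_nil, List.drop_zero]
        rw [ih rest [] (cur.reverse :: acc) (by simpa using Nat.lt_of_succ_lt_succ h)]
        simp [pvSplit]
      · simp only [PySem.Chars.splitOn.go, List.isPrefixOf, Bool.and_true]
        rw [if_neg (by simp; exact fun h => hc h.symm)]
        rw [ih rest (c :: cur) acc (by simpa using Nat.lt_of_succ_lt_succ h)]
        simp [pvSplit, hc]

lemma splitOn_comma (l : List Char) : PySem.Chars.splitOn l [','] = pvSplit l [] := by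
  unfold PySem.Chars.splitOn
  simpa using pvSplit_go (l.length + 1) l [] [] (by omega)

lemma strip_ofList (cs : List Char) :
    PySem.Str.strip (String.ofList cs) = String.ofList (PySem.Chars.strip cs) := by
  simp [PySem.Str.strip, String.toList_ofList]

/-- strip-then-filter applied to a token list, the value both sides produce. -/
def pvF (toks : List (List Char)) : List String :=
  (toks.map (fun cs => String.ofList (PySem.Chars.strip cs))).filter (fun s => s ≠ "")

lemma pvF_append (a b : List (List Char)) : pvF (a ++ b) = pvF a ++ pvF b := by
  simp [pvF]

lemma split?_comma (s : String) :
    (PySem.Str.split? s ",").getD [] = (pvSplit s.toList []).map String.ofList := by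
  have h : (",").toList = [','] := rfl
  simp [PySem.Str.split?, PySem.Chars.split?, h, splitOn_comma]

lemma inner_eq (xs : List (List Char)) : ∀ (specs : List String),
    (xs.map String.ofList).foldl (fun specs spec =>
      let spec := PySem.Str.strip spec
      if spec ≠ "" then specs ++ [spec] else specs) specs = specs ++ pvF xs := by
  induction xs with
  | nil => intro specs; simp [pvF]
  | cons cs rest ih =>
    intro specs
    simp only [List.map_cons, List.foldl_cons, strip_ofList]
    by_cases h : String.ofList (PySem.Chars.strip cs) = ""
    · rw [if_neg (by simpa using h), ih]
      simp [pvF, h]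
    · rw [if_pos (by simpa using h), ih]
      simp [pvF, h]

lemma A_eq (raw : List String) :
    flatten_specs raw = pvF (raw.flatMap (fun e => pvSplit e.toList [])) := by
  unfold flatten_specs
  suffices h : ∀ specs, raw.foldl (fun specs entry =>
      ((PySem.Str.split? entry ",").getD []).foldl (fun specs spec =>
        let spec := PySem.Str.strip spec
        if spec ≠ "" then specs ++ [spec] else specs) specs) specs
      = specs ++ pvF (raw.flatMap (fun e => pvSplit e.toList [])) by simpa using h []
  induction raw with
  | nil => intro specs; simp [pvF]
  | cons e rest ih =>
    intro specs
    rw [List.foldl_cons, split?_comma, inner_eq, ih, List.flatMap_cons, pvF_append]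
    simp [List.append_assoc]

lemma pvTrim_eq_strip (buf : List Char) : pvTrim buf = PySem.Chars.strip buf := rfl

lemma pvFlush_eq (specs : List String) (buf : List Char) :
    pvFlush specs buf = specs ++ pvF [buf] := by
  unfold pvFlush pvF
  rw [pvTrim_eq_strip]
  by_cases h : PySem.Chars.strip buf = []
  · simp [h]
  · rw [if_pos (by simpa using h)]
    simp [h]

/-- The state machine over one entry's characters, flushed at the end, produces exactly
    `pvF` of the comma-split of those characters (buffer generalised). -/
lemma machine_eq : ∀ (cs : List Char) (specs : List String) (buf : List Char),
    (let st := cs.foldl (fun (st : List String × List Char) ch =>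
        if ch = ',' then (pvFlush st.1 st.2, []) else (st.1, st.2 ++ [ch])) (specs, buf)
     pvFlush st.1 st.2) = specs ++ pvF (pvSplit cs buf.reverse) := by
  intro cs
  induction cs with
  | nil =>
    intro specs buf
    simp only [List.foldl_nil, pvSplit, List.reverse_reverse]
    exact pvFlush_eq specs buf
  | cons c rest ih =>
    intro specs buf
    by_cases hc : c = ','
    · subst hc
      simp only [List.foldl_cons, pvSplit, reduceIte, List.reverse_reverse]
      rw [ih (pvFlush specs buf) []]
      show pvFlush specs buf ++ pvF (pvSplit rest ([] : List Char).reverse)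
          = specs ++ pvF (buf :: pvSplit rest [])
      rw [pvFlush_eq]
      have : pvF (buf :: pvSplit rest []) = pvF [buf] ++ pvF (pvSplit rest []) := by
        simpa using pvF_append [buf] (pvSplit rest [])
      rw [this, List.append_assoc]
      rfl
    · simp only [List.foldl_cons, if_neg hc]
      rw [ih specs (buf ++ [c])]
      simp [pvSplit, hc]

lemma B_eq (raw : List String) :
    flatten_specs_alt raw = pvF (raw.flatMap (fun e => pvSplit e.toList [])) := by
  unfold flatten_specs_alt
  suffices h : ∀ specs, raw.foldl (fun specs entry =>
      let st := entry.toList.foldl (fun (st : List String × List Char) ch =>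
        if ch = ',' then (pvFlush st.1 st.2, []) else (st.1, st.2 ++ [ch])) (specs, [])
      pvFlush st.1 st.2) specs
      = specs ++ pvF (raw.flatMap (fun e => pvSplit e.toList [])) by simpa using h []
  induction raw with
  | nil => intro specs; simp [pvF]
  | cons e rest ih =>
    intro specs
    rw [List.foldl_cons]
    show rest.foldl _ (let st := e.toList.foldl _ (specs, ([] : List Char)); pvFlush st.1 st.2) = _
    rw [machine_eq e.toList specs []]
    rw [ih, List.flatMap_cons, pvF_append]
    simp [List.append_assoc]

-- ===== VERDICT (by name: the statement is the Claim_ definition above) =====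
theorem flatten_specs_spec : Claim_equal_flatten_specs := by
  intro raw _
  show flatten_specs raw = flatten_specs_alt raw
  rw [A_eq, B_eq]
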